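-- pv_equiv track=rewrite | github.com/harshal-mehta-code/AdventOfCode2018 | FindChecksum/FindChecksum.py | findCheckSum
-- ===== SOURCE A (Python) =====
-- import collections
--
-- def findCheckSum(boxIds):
--     numOfBoxWithTwoRepeatingLetters = 0
--     numOfBoxWithThreeRepeatingLetters = 0
--     for boxId in boxIds:
--         c = collections.Counter(boxId)
--         if(2 in c.values()):
--             numOfBoxWithTwoRepeatingLetters+=1
--         if(3 in c.values()):
--             numOfBoxWithThreeRepeatingLetters+=1
--     return numOfBoxWithThreeRepeatingLetters*numOfBoxWithTwoRepeatingLetters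
-- ===== SOURCE B (Python) =====
-- def findCheckSum(boxIds):
--     def runLengths(s):
--         # run-length encode an already-sorted character list
--         if not s:
--             return []
--         out = []
--         cur, cnt = s[0], 1
--         for d in s[1:]:
--             if d == cur:
--                 cnt += 1
--             else:
--                 out.append(cnt)
--                 cur, cnt = d, 1
--         out.append(cnt)
--         return out
--     twos = 0
--     threes = 0
--     for boxId in boxIds:
--         runs = runLengths(sorted(boxId))
--         if 2 in runs:
--             twos += 1
--         if 3 in runs:
--             threes += 1
--     return threes * twos
-- ===== Notes on version B (the rewrite author's own statement) =====
-- stated objective: alternative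
-- what changed: Replaces the per-id hash-based Counter histogram with sort-and-group run detection: each id's characters are sorted and the lengths of consecutive-equal runs are scanned; an id counts toward twos/threes iff 2/3 appears among its run lengths.
import Mathlib
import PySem

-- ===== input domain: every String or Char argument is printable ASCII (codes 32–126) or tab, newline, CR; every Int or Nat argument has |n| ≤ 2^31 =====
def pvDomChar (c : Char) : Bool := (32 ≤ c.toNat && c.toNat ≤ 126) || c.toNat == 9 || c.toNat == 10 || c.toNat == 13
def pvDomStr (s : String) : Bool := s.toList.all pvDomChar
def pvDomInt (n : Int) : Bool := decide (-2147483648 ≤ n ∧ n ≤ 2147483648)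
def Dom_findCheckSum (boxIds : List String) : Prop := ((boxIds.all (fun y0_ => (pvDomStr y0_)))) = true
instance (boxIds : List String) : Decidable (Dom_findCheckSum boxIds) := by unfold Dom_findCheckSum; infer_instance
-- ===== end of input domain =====

-- B replaces A's per-id hash Counter by sort-and-group run-length detection (objective: alternative).

-- ===== PORT A =====
-- one loop over boxIds, carrying both accumulators; Counter(boxId) per id
def findCheckSum (boxIds : List String) : Int :=
  let p := boxIds.foldl
    (fun (acc : Int × Int) boxId =>
      let c := PySem.Dict.counter boxId.toList
      let acc := if (c.values).contains (2 : Int) then (acc.1 + 1, acc.2) else acc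
      if (c.values).contains (3 : Int) then (acc.1, acc.2 + 1) else acc)
    (0, 0)
  p.2 * p.1

-- ===== PORT B =====
-- runLengths: the for-loop over s[1:] carrying (cur, cnt, out), as structural recursion;
-- out is appended front-to-back exactly as in Source B
def pvRunsAux (cur : Char) (cnt : Int) : List Char → List Int
  | [] => [cnt]
  | d :: ds => if d == cur then pvRunsAux cur (cnt + 1) ds else cnt :: pvRunsAux d 1 ds

def pvRunLengths : List Char → List Int
  | [] => []
  | c :: cs => pvRunsAux c 1 cs

def findCheckSum_alt (boxIds : List String) : Int :=
  let p := boxIds.foldl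
    (fun (acc : Int × Int) boxId =>
      let runs := pvRunLengths (PySem.List.sorted boxId.toList (fun x => x) false)
      let acc := if runs.contains (2 : Int) then (acc.1 + 1, acc.2) else acc
      if runs.contains (3 : Int) then (acc.1, acc.2 + 1) else acc)
    (0, 0)
  p.2 * p.1

-- ===== PRECONDITION & SPEC =====
def Spec_findCheckSum (boxIds : List String) (out : Int) : Prop := out = findCheckSum_alt boxIds
instance (boxIds : List String) (out : Int) : Decidable (Spec_findCheckSum boxIds out) := by unfold Spec_findCheckSum; infer_instance

-- ===== CLAIM (what is proved, stated in full; the proofs are below) =====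
def Claim_equal_findCheckSum : Prop := ∀ (boxIds : List String), Dom_findCheckSum boxIds → Spec_findCheckSum boxIds (findCheckSum boxIds)

-- ===== LEMMAS AND PROOFS =====

-- membership in the run lengths of a sorted tail: the current run ends with cnt + (count of cur),
-- and every later run is the full count of some element ≠ cur
theorem pv_runsAux_mem (n : Int) (cur : Char) (cnt : Int) (ds : List Char)
    (hs : ds.Pairwise (· ≤ ·)) (hc : ∀ x ∈ ds, cur ≤ x) :
    (pvRunsAux cur cnt ds).contains n = true ↔
      n = cnt + (ds.count cur : Int) ∨ ∃ x ∈ ds, x ≠ cur ∧ (ds.count x : Int) = n := by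
  induction ds generalizing cur cnt with
  | nil => simp [pvRunsAux]
  | cons d ds ih =>
    rcases List.pairwise_cons.mp hs with ⟨hd, hs'⟩
    by_cases hdc : d = cur
    · subst hdc
      rw [pvRunsAux, if_pos (by simp), ih d (cnt + 1) hs' hd]
      constructor
      · rintro (h | ⟨x, hx, hxd, hxc⟩)
        · left; rw [List.count_cons_self]; push_cast; omega
        · right
          exact ⟨x, List.mem_cons_of_mem _ hx, hxd, by rw [List.count_cons_of_ne (Ne.symm hxd)]; exact hxc⟩
      · rintro (h | ⟨x, hx, hxd, hxc⟩)
        · left; rw [List.count_cons_self] at h; push_cast at h ⊢; omega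
        · rcases List.mem_cons.mp hx with rfl | hx'
          · exact absurd rfl hxd
          · right; exact ⟨x, hx', hxd, by rw [List.count_cons_of_ne (Ne.symm hxd)] at hxc; exact hxc⟩
    · -- cur < d ≤ every x ∈ ds, so cur occurs no more
      have hlt : cur < d := lt_of_le_of_ne (hc d (List.mem_cons_self)) (Ne.symm hdc)
      have hne : ∀ x ∈ ds, x ≠ cur := fun x hx h =>
        absurd (lt_of_lt_of_le hlt (hd x hx)) (by rw [h]; exact lt_irrefl _)
      have hcnt0 : (d :: ds).count cur = 0 := by
        rw [List.count_eq_zero]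
        intro h
        rcases List.mem_cons.mp h with h' | h'
        · exact hdc h'.symm
        · exact hne cur h' rfl
      rw [pvRunsAux, if_neg (by simpa using hdc)]
      simp only [List.contains_cons, Bool.or_eq_true, beq_iff_eq,
        ih d 1 hs' hd, hcnt0]
      constructor
      · rintro (h | h | ⟨x, hx, hxd, hxc⟩)
        · left; omega
        · right
          refine ⟨d, List.mem_cons_self, hdc, ?_⟩
          rw [List.count_cons_self]; push_cast; omega
        · right
          exact ⟨x, List.mem_cons_of_mem _ hx, hne x hx,
            by rw [List.count_cons_of_ne (Ne.symm hxd)]; exact hxc⟩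
      · rintro (h | ⟨x, hx, hxc, hxn⟩)
        · left; omega
        · rcases List.mem_cons.mp hx with rfl | hx'
          · right; left; rw [List.count_cons_self] at hxn; push_cast at hxn ⊢; omega
          · by_cases hxd : x = d
            · subst hxd; right; left
              rw [List.count_cons_self] at hxn; push_cast at hxn ⊢; omega
            · right; right
              exact ⟨x, hx', hxd, by rw [List.count_cons_of_ne (Ne.symm hxd)] at hxn; exact hxn⟩

-- on a sorted list, the run lengths are exactly the multiplicities of its members
theorem pv_runLengths_mem (n : Int) (t : List Char) (hs : t.Pairwise (· ≤ ·)) :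
    (pvRunLengths t).contains n = true ↔ ∃ x ∈ t, (t.count x : Int) = n := by
  cases t with
  | nil => simp [pvRunLengths]
  | cons c cs =>
    rcases List.pairwise_cons.mp hs with ⟨hd, hs'⟩
    rw [pvRunLengths, pv_runsAux_mem n c 1 cs hs' hd]
    constructor
    · rintro (h | ⟨x, hx, hxc, hxn⟩)
      · exact ⟨c, List.mem_cons_self, by rw [List.count_cons_self]; push_cast; omega⟩
      · exact ⟨x, List.mem_cons_of_mem _ hx,
          by rw [List.count_cons_of_ne (Ne.symm hxc)]; exact hxn⟩
    · rintro ⟨x, hx, hxn⟩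
      rcases List.mem_cons.mp hx with rfl | hx'
      · left; rw [List.count_cons_self] at hxn; push_cast at hxn ⊢; omega
      · by_cases hxc : x = c
        · subst hxc; left; rw [List.count_cons_self] at hxn; push_cast at hxn ⊢; omega
        · right
          exact ⟨x, hx', hxc, by rw [List.count_cons_of_ne (Ne.symm hxc)] at hxn; exact hxn⟩

-- A's per-id test: 'n ∈ Counter(boxId).values()' lists the multiplicities of the members
theorem pv_counter_values_mem (cs : List Char) (n : Int) :
    ((PySem.Dict.counter cs).values).contains n = true ↔ ∃ x ∈ cs, (cs.count x : Int) = n := by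
  have hv : (PySem.Dict.counter cs).values
      = (PySem.Set.ofList cs).map (fun k => ((cs.count k : Int))) := by
    show ((PySem.Dict.counter cs).items).map Prod.snd = _
    rw [PySem.Dict.items_counter]
    simp [List.map_map, Function.comp]
  rw [hv]
  simp only [List.contains_eq_any_beq, List.any_map, List.any_eq_true, Function.comp,
    beq_iff_eq, PySem.Set.mem_ofList]
  constructor
  · rintro ⟨k, hk, h⟩; exact ⟨k, hk, h.symm⟩
  · rintro ⟨k, hk, h⟩; exact ⟨k, hk, h.symm⟩

-- the two per-id tests agree: runs of the sorted id list vs Counter values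
theorem pv_tests_eq (cs : List Char) (n : Int) :
    (pvRunLengths (PySem.List.sorted cs (fun x => x) false)).contains n
      = ((PySem.Dict.counter cs).values).contains n := by
  have hperm : (PySem.List.sorted cs (fun x => x) false).Perm cs := PySem.List.sorted_perm cs (fun x => x) false
  rw [Bool.eq_iff_iff, pv_counter_values_mem,
    pv_runLengths_mem n _ (by simpa using PySem.List.sorted_pairwise (xs := cs) (key := fun x => x))]
  constructor
  · rintro ⟨x, hx, hxn⟩
    exact ⟨x, hperm.mem_iff.mp hx, by rw [hperm.count_eq] at hxn; exact hxn⟩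
  · rintro ⟨x, hx, hxn⟩
    exact ⟨x, hperm.mem_iff.mpr hx, by rw [hperm.count_eq]; exact hxn⟩

-- ===== VERDICT (by name: the statement is the Claim_ definition above) =====
theorem findCheckSum_spec : Claim_equal_findCheckSum := by
  intro boxIds _
  show findCheckSum boxIds = findCheckSum_alt boxIds
  simp only [findCheckSum, findCheckSum_alt, pv_tests_eq]
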